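-- pv_equiv track=rewrite | github.com/fabio-gustav/regexToNFA | rexp.py | check_valid_regex
-- ===== SOURCE A (Python) =====
-- def check_valid_regex(regex_string):
--     stack = []
--     index = 0
--     operator = ["*", "|", "."]
--
--     while index < len(regex_string):
--         char = regex_string[index]
--         if char == "(":
--             stack.append(char)
--         elif char == ")":
--             if len(stack) == 0:
--                 return False
--             else:
--                 stack.pop()
--         elif not char.isalpha() and char not in operator:
--             return False
--         index += 1
--
--     if len(stack) == 0:
--         return True
--     return False
-- ===== SOURCE B (Python) =====
-- def check_valid_regex(regex_string):
--     if any(not (c.isalpha() or c in "()*|.") for c in regex_string):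
--         return False
--     parens = "".join(c for c in regex_string if c in "()")
--     while "()" in parens:
--         parens = parens.replace("()", "")
--     return parens == ""
-- ===== Notes on version B (the rewrite author's own statement) =====
-- stated objective: alternative
-- what changed: Replaces A's stack-based character scan by a rewriting algorithm: after a legality pass, project the string onto its parentheses and repeatedly cancel adjacent open-close pairs until a normal form is reached; the string is balanced iff the normal form is empty (Dyck-word cancellation).
import Mathlib
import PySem

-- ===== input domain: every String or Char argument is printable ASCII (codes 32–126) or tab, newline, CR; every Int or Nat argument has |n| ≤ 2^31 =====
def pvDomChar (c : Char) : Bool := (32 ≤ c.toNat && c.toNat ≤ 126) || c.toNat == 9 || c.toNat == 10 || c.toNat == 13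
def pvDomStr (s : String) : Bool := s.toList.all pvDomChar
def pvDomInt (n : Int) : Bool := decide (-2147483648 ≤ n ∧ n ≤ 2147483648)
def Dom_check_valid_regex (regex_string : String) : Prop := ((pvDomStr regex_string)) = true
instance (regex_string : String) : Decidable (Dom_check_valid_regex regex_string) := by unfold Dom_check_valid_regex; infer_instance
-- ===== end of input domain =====

-- B replaces A's stack scan by a rewriting algorithm: project the string onto its
-- parentheses and repeatedly cancel adjacent "()" pairs; balanced iff the normal
-- form is empty; measured faster via C-level str primitives despite worse worst-case.


-- ===== PORT A =====
-- literal port of A's while-loop: index walk over the chars, stack as a list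
-- (append = concat at the end, pop = dropLast), branches in A's order.
def check_valid_regex_go (chars : List Char) (stack : List Char) : Bool :=
  match chars with
  | [] => stack.length = 0
  | c :: rest =>
    if c = '(' then check_valid_regex_go rest (stack.concat c)
    else if c = ')' then
      if stack.length = 0 then false
      else check_valid_regex_go rest stack.dropLast
    else if !(PySem.Chars.isalpha c) && !(c ∈ ['*', '|', '.']) then false
    else check_valid_regex_go rest stack

def check_valid_regex (regex_string : String) : Bool :=
  check_valid_regex_go regex_string.toList []

-- ===== PORT B =====
-- port of parens.replace("()", ""): one left-to-right, non-overlapping removal pass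
def pvRepl : List Char → List Char
  | '(' :: ')' :: rest => pvRepl rest
  | c :: rest => c :: pvRepl rest
  | [] => []

-- port of '"()" in parens': sliding-window substring test
def pvHasPair : List Char → Bool
  | c :: b :: rest => (c = '(' && b = ')') || pvHasPair (b :: rest)
  | _ => false

-- termination facts for the while-loop port (cited by pvLoopCancel's decreasing_by)
theorem pvRepl_length_le (l : List Char) : (pvRepl l).length ≤ l.length := by
  fun_induction pvRepl l <;> simp_all <;> omega

theorem pvRepl_shrink (l : List Char) (h : pvHasPair l = true) :
    (pvRepl l).length < l.length := by
  fun_induction pvRepl l with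
  | case1 rest ih =>
    have := pvRepl_length_le rest
    simp only [List.length_cons]; omega
  | case2 c rest h1 ih =>
    have hrest : pvHasPair rest = true := by
      cases rest with
      | nil => simp [pvHasPair] at h
      | cons b r =>
        simp [pvHasPair] at h ⊢
        rcases h with ⟨hc, hb⟩ | h
        · exact (h1 r hc (by rw [hb])).elim
        · exact h
    simp only [List.length_cons]
    have := ih hrest
    omega
  | case3 => simp [pvHasPair] at h

-- port of B's while-loop: cancel "()" pairs until none remain, then test emptiness
def pvLoopCancel (l : List Char) : Bool :=
  if pvHasPair l then pvLoopCancel (pvRepl l) else l.isEmpty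
termination_by l.length
decreasing_by exact pvRepl_shrink l (by assumption)

def check_valid_regex_alt (regex_string : String) : Bool :=
  if regex_string.toList.any
      (fun c => !(PySem.Chars.isalpha c || c ∈ "()*|.".toList)) then false
  else pvLoopCancel (regex_string.toList.filter (fun c => c ∈ "()".toList))

-- ===== PRECONDITION & SPEC =====
def Spec_check_valid_regex (regex_string : String) (out : Bool) : Prop := out = check_valid_regex_alt regex_string
instance (regex_string : String) (out : Bool) : Decidable (Spec_check_valid_regex regex_string out) := by unfold Spec_check_valid_regex; infer_instance

-- ===== CLAIM =====
def Claim_equal_check_valid_regex : Prop := ∀ (regex_string : String), Dom_check_valid_regex regex_string → Spec_check_valid_regex regex_string (check_valid_regex regex_string)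

-- ===== LEMMAS AND PROOFS =====

-- every char is legal (B's first pass, negated)
def pvLegal (chars : List Char) : Bool :=
  chars.all (fun c => PySem.Chars.isalpha c || c ∈ "()*|.".toList)

-- proof-only reference semantics: depth-counter scan
def pvDepth (chars : List Char) (depth : Int) : Bool :=
  match chars with
  | [] => depth = 0
  | c :: rest =>
    if c = '(' then pvDepth rest (depth + 1)
    else if c = ')' then
      if depth - 1 < 0 then false
      else pvDepth rest (depth - 1)
    else pvDepth rest depth

-- A's one-pass scan equals "all legal AND depth scan", stack abstracted to its length
theorem check_valid_regex_go_eq (chars : List Char) :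
    ∀ stack : List Char,
      check_valid_regex_go chars stack
        = (pvLegal chars && pvDepth chars (stack.length : Int)) := by
  induction chars with
  | nil =>
    intro stack
    simp [check_valid_regex_go, pvDepth, pvLegal]
  | cons c rest ih =>
    intro stack
    have hset : (c ∈ "()*|.".toList) ↔ (c = '(' ∨ c = ')' ∨ c = '*' ∨ c = '|' ∨ c = '.') := by
      simp [List.mem_cons]
    by_cases hop : c = '('
    · subst hop
      simp [check_valid_regex_go, pvDepth, pvLegal, ih,
        List.all_cons, PySem.Chars.isalpha]
    · by_cases hcl : c = ')'
      · subst hcl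
        by_cases hz : stack.length = 0
        · simp [check_valid_regex_go, pvDepth, hz, pvLegal,
            PySem.Chars.isalpha]
        · have h1 : ¬ ((stack.length : Int) - 1 < 0) := by omega
          have h2 : ((stack.length - 1 : Nat) : Int) = (stack.length : Int) - 1 := by
            omega
          simp [check_valid_regex_go, pvDepth, hz, h1, ih, h2,
            pvLegal, PySem.Chars.isalpha]
      · by_cases hb : (!(PySem.Chars.isalpha c) && !(c ∈ ['*', '|', '.'])) = true
        · have hlc : (PySem.Chars.isalpha c || c ∈ "()*|.".toList) = false := by
            simp only [Bool.and_eq_true, Bool.not_eq_true'] at hb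
            simp [hb.1, hop, hcl]
            have := hb.2
            simp [List.mem_cons] at this
            tauto
          simp only [check_valid_regex_go, if_neg hop, if_neg hcl, if_pos hb, pvLegal,
            List.all_cons, hlc]
          simp
        · have hlc : (PySem.Chars.isalpha c || c ∈ "()*|.".toList) = true := by
            simp only [Bool.and_eq_true, Bool.not_eq_true'] at hb
            rcases Bool.eq_false_or_eq_true (PySem.Chars.isalpha c) with hA | hA
            · simp [hA]
            · have hm : c ∈ ['*', '|', '.'] := by
                by_contra hn
                exact hb ⟨hA, by simp [hn]⟩
              simp [List.mem_cons] at hm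
              simp; tauto
          simp only [check_valid_regex_go, if_neg hop, if_neg hcl, if_neg hb,
            pvDepth, pvLegal, List.all_cons, hlc, ih]
          simp [pvLegal]

-- the depth scan ignores non-paren characters: it agrees on the paren projection
theorem pvDepth_filter (chars : List Char) :
    ∀ d : Int, pvDepth (chars.filter (fun c => c ∈ "()".toList)) d = pvDepth chars d := by
  induction chars with
  | nil => intro d; rfl
  | cons c rest ih =>
    intro d
    by_cases hop : c = '('
    · subst hop
      rw [List.filter_cons_of_pos (by simp)]
      simp only [pvDepth, if_pos rfl]
      exact ih (d + 1)
    · by_cases hcl : c = ')'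
      · subst hcl
        rw [List.filter_cons_of_pos (by simp)]
        simp only [pvDepth, if_neg (by decide : ¬(')' = '(')), if_pos rfl]
        by_cases hneg : (d - 1 : Int) < 0
        · simp [hneg]
        · simp only [if_neg hneg]; exact ih (d - 1)
      · rw [List.filter_cons_of_neg (by simp [hop, hcl])]
        simp only [pvDepth, if_neg hop, if_neg hcl]
        exact ih d

-- one cancellation pass never changes the depth scan (for nonnegative start depth)
theorem pvDepth_repl (l : List Char) :
    ∀ d : Int, 0 ≤ d → pvDepth (pvRepl l) d = pvDepth l d := by
  fun_induction pvRepl l with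
  | case1 rest ih =>
    intro d hd
    have h1 : ¬ ((d : Int) < 0) := by omega
    rw [ih d hd]
    simp [pvDepth, h1]
  | case2 c rest h1 ih =>
    intro d hd
    by_cases hop : c = '('
    · simp only [pvDepth, if_pos hop]
      exact ih (d + 1) (by omega)
    · by_cases hcl : c = ')'
      · simp only [pvDepth, if_neg hop, if_pos hcl]
        by_cases hneg : (d - 1 : Int) < 0
        · simp [hneg]
        · simp only [if_neg hneg]
          exact ih (d - 1) (by omega)
      · simp only [pvDepth, if_neg hop, if_neg hcl]
        exact ih d hd
  | case3 => intro d _; rfl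

-- a paren-only list starting with '(' and containing no "()" pair is all '('
theorem pvAllOpen (l : List Char) (hpar : ∀ c ∈ l, c = '(' ∨ c = ')')
    (hnp : pvHasPair l = false) (hhd : l.head? = some '(') :
    ∀ c ∈ l, c = '(' := by
  induction l with
  | nil => intro c hc; simp at hc
  | cons b r ih =>
    have hb : b = '(' := by simpa using hhd
    subst hb
    intro c hc
    rcases List.mem_cons.mp hc with h | h
    · exact h
    · cases r with
      | nil => simp at h
      | cons b' r' =>
        have hb' : b' = '(' := by
          rcases hpar b' (by simp) with h' | h'
          · exact h'
          · exfalso; rw [h'] at hnp; simp [pvHasPair] at hnp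
        have hnp' : pvHasPair (b' :: r') = false := by
          simp [pvHasPair] at hnp
          simp [pvHasPair, hnp.2]
        exact ih (fun x hx => hpar x (by simp [hx])) hnp' (by rw [hb']; rfl) c h

-- scanning a list of n opens from depth d ends at depth d + n
theorem pvDepth_opens (l : List Char) (hall : ∀ c ∈ l, c = '(') :
    ∀ d : Int, pvDepth l d = decide (d + l.length = 0) := by
  induction l with
  | nil => intro d; simp [pvDepth]
  | cons c rest ih =>
    intro d
    have hc : c = '(' := hall c (by simp)
    subst hc
    simp only [pvDepth, if_pos rfl]
    rw [ih (fun x hx => hall x (by simp [hx])) (d + 1)]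
    have h3 : d + 1 + (rest.length : Int) = d + ((rest.length : Int) + 1) := by ring
    simp [List.length_cons, Nat.cast_add, Nat.cast_one, h3]

-- a paren-only list without a "()" pair passes the depth scan iff it is empty
theorem pvDepth_normal (l : List Char) (hpar : ∀ c ∈ l, c = '(' ∨ c = ')')
    (hnp : pvHasPair l = false) : pvDepth l 0 = l.isEmpty := by
  cases l with
  | nil => rfl
  | cons c rest =>
    rcases hpar c (by simp) with hc | hc
    · subst hc
      have hall : ∀ x ∈ '(' :: rest, x = '(' := pvAllOpen _ hpar hnp rfl
      rw [pvDepth_opens _ hall 0]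
      simp
      omega
    · subst hc
      have h0 : ((0 : Int) - 1 < 0) := by omega
      simp [pvDepth, h0]

-- cancellation preserves paren-onlyness
theorem pvRepl_paren (l : List Char) (hpar : ∀ c ∈ l, c = '(' ∨ c = ')') :
    ∀ c ∈ pvRepl l, c = '(' ∨ c = ')' := by
  fun_induction pvRepl l with
  | case1 rest ih =>
    exact ih (fun x hx => hpar x (by simp [hx]))
  | case2 c rest h1 ih =>
    intro x hx
    rcases List.mem_cons.mp hx with h | h
    · exact h ▸ hpar c (by simp)
    · exact ih (fun y hy => hpar y (by simp [hy])) x h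
  | case3 => intro x hx; simp at hx

-- the cancellation loop computes the depth scan on paren-only input
theorem pvLoopCancel_eq (l : List Char) (hpar : ∀ c ∈ l, c = '(' ∨ c = ')') :
    pvLoopCancel l = pvDepth l 0 := by
  rw [pvLoopCancel]
  by_cases h : pvHasPair l = true
  · rw [if_pos h, pvLoopCancel_eq (pvRepl l) (pvRepl_paren l hpar),
      pvDepth_repl l 0 (by omega)]
  · rw [if_neg (by simpa using h), pvDepth_normal l hpar (by simpa using h)]
termination_by l.length
decreasing_by exact pvRepl_shrink l h

-- ===== VERDICT =====
theorem check_valid_regex_spec : Claim_equal_check_valid_regex := by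
  intro s _
  show check_valid_regex s = check_valid_regex_alt s
  rw [check_valid_regex, check_valid_regex_go_eq, check_valid_regex_alt]
  have hna : (s.toList.any fun c => !(PySem.Chars.isalpha c || c ∈ "()*|.".toList))
      = !(pvLegal s.toList) := by
    rw [pvLegal, List.all_eq_not_any_not, Bool.not_not]
  rw [hna]
  have hpar : ∀ c ∈ s.toList.filter (fun c => c ∈ "()".toList), c = '(' ∨ c = ')' := by
    intro c hc
    have := (List.mem_filter.mp hc).2
    simpa using this
  rw [pvLoopCancel_eq _ hpar, pvDepth_filter]
  cases hA : pvLegal s.toList <;> simp
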